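-- pv_equiv track=rewrite | github.com/brianstrauch/competitive-programming | google-code-jam/2021/qualification/b.py | solve
-- ===== SOURCE A (Python) =====
-- def solve(x, y, s):
--     cost = 0
--     c = '?'
--
--     for i in range(len(s)):
--         if s[i] == 'C':
--             if c == 'J':
--                 cost += y
--             c = 'C'
--         elif s[i] == 'J':
--             if c == 'C':
--                 cost += x
--             c = 'J'
--
--     return cost
-- ===== SOURCE B (Python) =====
-- def solve(x, y, s):
--     t = ''.join(ch for ch in s if ch in ('C', 'J'))
--     return x * t.count('CJ') + y * t.count('JC')
-- ===== Notes on version B (the rewrite author's own statement) =====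
-- stated objective: simpler
-- what changed: Replaces the running previous-character state machine by filtering s to its C/J subsequence and computing x*t.count('CJ') + y*t.count('JC'): non-overlapping substring counting replaces transition tracking (correct because a 2-char pattern of distinct characters cannot overlap itself).
import Mathlib
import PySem

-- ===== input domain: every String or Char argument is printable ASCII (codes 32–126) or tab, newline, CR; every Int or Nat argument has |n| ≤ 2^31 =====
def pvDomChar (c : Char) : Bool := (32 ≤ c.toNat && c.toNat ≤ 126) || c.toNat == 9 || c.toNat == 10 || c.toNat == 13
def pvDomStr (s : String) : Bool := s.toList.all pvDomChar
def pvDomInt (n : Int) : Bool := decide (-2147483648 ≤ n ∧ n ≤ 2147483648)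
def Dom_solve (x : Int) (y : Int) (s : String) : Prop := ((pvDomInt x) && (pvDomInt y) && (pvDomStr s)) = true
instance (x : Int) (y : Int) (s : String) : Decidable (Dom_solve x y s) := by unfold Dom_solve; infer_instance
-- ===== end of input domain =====

-- B replaces A's previous-character state machine by non-overlapping substring counting
-- on the C/J subsequence: x * t.count("CJ") + y * t.count("JC") (objective: simpler; same O(n)).

-- ===== PORT A =====
-- A's loop over the characters of s, carrying (cost, c) exactly as the Python does.
def solveStep (x : Int) (y : Int) (st : Int × Char) (ch : Char) : Int × Char :=
  if ch = 'C' then (if st.2 = 'J' then (st.1 + y, 'C') else (st.1, 'C'))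
  else if ch = 'J' then (if st.2 = 'C' then (st.1 + x, 'J') else (st.1, 'J'))
  else st

def solve (x : Int) (y : Int) (s : String) : Int :=
  (s.toList.foldl (solveStep x y) (0, '?')).1

-- ===== PORT B =====
-- t = ''.join(ch for ch in s if ch in ('C','J')); x * t.count('CJ') + y * t.count('JC')
def solve_alt (x : Int) (y : Int) (s : String) : Int :=
  x * (PySem.Str.count (String.ofList (s.toList.filter (fun ch => ch == 'C' || ch == 'J'))) "CJ" : Int)
  + y * (PySem.Str.count (String.ofList (s.toList.filter (fun ch => ch == 'C' || ch == 'J'))) "JC" : Int)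

-- ===== PRECONDITION & SPEC =====
def Spec_solve (x : Int) (y : Int) (s : String) (out : Int) : Prop := out = solve_alt x y s
instance (x : Int) (y : Int) (s : String) (out : Int) : Decidable (Spec_solve x y s out) := by unfold Spec_solve; infer_instance

-- ===== CLAIM (what is proved, stated in full; the proofs are below) =====
def Claim_equal_solve : Prop := ∀ (x : Int) (y : Int) (s : String), Dom_solve x y s → Spec_solve x y s (solve x y s)

-- ===== LEMMAS AND PROOFS =====

-- Number of adjacent (a, b) pairs in a list (proof-side characterisation of both programs).
def cntPat (a b : Char) : List Char → Nat
  | u :: v :: t => (if u = a ∧ v = b then 1 else 0) + cntPat a b (v :: t)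
  | _ => 0

-- For a 2-char pattern [a, b] with a ≠ b, occurrences cannot overlap, so Python's
-- non-overlapping s.count equals the adjacent-pair count.
theorem countGo_eq_cntPat (a b : Char) (hab : a ≠ b) :
    ∀ (fuel : Nat) (cs : List Char) (acc : Nat), cs.length ≤ fuel →
      PySem.Chars.count.go [a, b] fuel cs acc = acc + cntPat a b cs := by
  intro fuel
  induction fuel with
  | zero =>
    intro cs acc h
    have hnil : cs = [] := List.eq_nil_of_length_eq_zero (Nat.le_zero.mp h)
    subst hnil
    simp [PySem.Chars.count.go, cntPat]
  | succ n ih =>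
    rintro (_ | ⟨u, _ | ⟨v, t⟩⟩) acc h
    · simp [PySem.Chars.count.go, cntPat]
    · have hpre : ([a, b].isPrefixOf [u]) = false := by
        simp [List.isPrefixOf]
      simp only [PySem.Chars.count.go, hpre, Bool.false_eq_true, if_false]
      rw [ih [] acc (by simp)]
      simp [cntPat]
    · by_cases hm : u = a ∧ v = b
      · obtain ⟨hu, hv⟩ := hm; subst hu; subst hv
        have hpre : ([u, v].isPrefixOf (u :: v :: t)) = true := by
          simp [List.isPrefixOf]
        simp only [PySem.Chars.count.go, hpre, if_true]
        have hlen : t.length ≤ n := by simp at h; omega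
        simp only [List.length_cons, List.length_nil, List.drop_succ_cons, List.drop_zero]
        rw [ih t (acc + 1) hlen]
        have hcnt : cntPat u v (u :: v :: t) = 1 + cntPat u v t := by
          cases t with
          | nil => simp [cntPat]
          | cons w r => simp [cntPat, Ne.symm hab]
        rw [hcnt]; omega
      · have hpre : ([a, b].isPrefixOf (u :: v :: t)) = false := by
          simp only [List.isPrefixOf]
          by_cases h1 : a = u
          · have h2 : b ≠ v := fun h => hm ⟨h1.symm, h.symm⟩
            simp [h2]
          · simp [h1]
        simp only [PySem.Chars.count.go, hpre, Bool.false_eq_true, if_false]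
        have hlen : (v :: t).length ≤ n := by simp at h ⊢; omega
        rw [ih (v :: t) acc hlen]
        have hcnt : cntPat a b (u :: v :: t) = cntPat a b (v :: t) := by
          simp [cntPat, hm]
        omega

-- A's per-transition cost of an adjacent pair, and its sum along a list.
def pairCost (x : Int) (y : Int) (a : Char) (b : Char) : Int :=
  if a = 'C' ∧ b = 'J' then x else if a = 'J' ∧ b = 'C' then y else 0

def pairSum (x : Int) (y : Int) : List Char → Int
  | a :: b :: t => pairCost x y a b + pairSum x y (b :: t)
  | _ => 0

theorem pairSum_eq_cnt (x y : Int) (cs : List Char) :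
    pairSum x y cs = x * (cntPat 'C' 'J' cs : Int) + y * (cntPat 'J' 'C' cs : Int) := by
  induction cs with
  | nil => simp [pairSum, cntPat]
  | cons a t ih =>
    cases t with
    | nil => simp [pairSum, cntPat]
    | cons b r =>
      simp only [pairSum, cntPat] at *
      rw [ih]
      by_cases h1 : a = 'C' ∧ b = 'J'
      · have h2 : ¬ (a = 'J' ∧ b = 'C') := by
          rintro ⟨h, _⟩; rw [h1.1] at h; exact absurd h (by decide)
        simp [pairCost, h1, h2]; ring
      · by_cases h2 : a = 'J' ∧ b = 'C'
        · simp [pairCost, h1, h2]; ring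
        · simp [pairCost, h1, h2]

theorem foldA_eq_pairSum (x y : Int) (l : List Char) (cost : Int) (c : Char) :
    (l.foldl (solveStep x y) (cost, c)).1
      = cost + pairSum x y (c :: l.filter (fun ch => ch == 'C' || ch == 'J')) := by
  induction l generalizing cost c with
  | nil => simp [pairSum]
  | cons ch rest ih =>
    simp only [List.foldl_cons]
    by_cases hc : ch = 'C'
    · subst hc
      by_cases hj : c = 'J'
      · subst hj
        have hstep : solveStep x y (cost, 'J') 'C' = (cost + y, 'C') := by
          simp [solveStep]
        rw [hstep, ih]
        simp [pairSum, pairCost]; ring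
      · have hstep : solveStep x y (cost, c) 'C' = (cost, 'C') := by
          simp [solveStep, hj]
        rw [hstep, ih]
        simp [pairSum, pairCost, hj]
    · by_cases hjch : ch = 'J'
      · subst hjch
        by_cases hcC : c = 'C'
        · subst hcC
          have hstep : solveStep x y (cost, 'C') 'J' = (cost + x, 'J') := by
            simp [solveStep]
          rw [hstep, ih]
          simp [pairSum, pairCost]; ring
        · have hstep : solveStep x y (cost, c) 'J' = (cost, 'J') := by
            simp [solveStep, hcC]
          rw [hstep, ih]
          simp [pairSum, pairCost, hcC]
      · have hstep : solveStep x y (cost, c) ch = (cost, c) := by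
          simp [solveStep, hc, hjch]
        rw [hstep, ih]
        simp [hc, hjch]

theorem pairSum_qmark (x y : Int) (t : List Char) :
    pairSum x y ('?' :: t) = pairSum x y t := by
  cases t with
  | nil => rfl
  | cons a u => simp [pairSum, pairCost]

theorem count_ofList_pair (cs : List Char) (a b : Char) (hab : a ≠ b)
    (hl : (String.ofList [a, b]).toList = [a, b]) :
    PySem.Str.count (String.ofList cs) (String.ofList [a, b]) = cntPat a b cs := by
  have h1 : PySem.Str.count (String.ofList cs) (String.ofList [a, b])
      = PySem.Chars.count cs [a, b] := by
    simp [PySem.Str.count, hl]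
  rw [h1]
  simp only [PySem.Chars.count, List.isEmpty_cons, Bool.false_eq_true, if_false]
  rw [countGo_eq_cntPat a b hab cs.length cs 0 (le_refl _)]
  omega

-- ===== VERDICT (by name: the statement is the Claim_ definition above) =====
theorem solve_spec : Claim_equal_solve := by
  intro x y s _
  unfold Spec_solve solve solve_alt
  rw [foldA_eq_pairSum, pairSum_qmark]
  rw [show ("CJ" : String) = String.ofList ['C', 'J'] from rfl,
      show ("JC" : String) = String.ofList ['J', 'C'] from rfl]
  rw [count_ofList_pair _ 'C' 'J' (by decide) rfl,
      count_ofList_pair _ 'J' 'C' (by decide) rfl,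
      pairSum_eq_cnt]
  ring
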